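-- pv_equiv track=rewrite | github.com/bottleling/scratches | findProfession.py | findProfession
-- ===== SOURCE A (Python) =====
-- def findProfession(level, pos):
--     if level == 1:
--         return "Engineer"
--     x = (pos+1)//2
--     p = findProfession(level-1, x)
--     if p == "Doctor":
--         return "Doctor" if pos%2 == 1 else "Engineer" #if it's the first child (indexed starting from 1), it takes the parent's profession
--
--     return "Engineer" if pos%2 == 1 else "Doctor"
-- ===== SOURCE B (Python) =====
-- def findProfession(level, pos):
--     bit = 0  # 0 = Engineer, 1 = Doctor
--     for _ in range(level - 1):
--         bit = 1 ^ bit ^ (pos % 2)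
--         pos = (pos + 1) // 2
--     return "Doctor" if bit else "Engineer"
-- ===== Notes on version B (the rewrite author's own statement) =====
-- stated objective: simpler
-- what changed: Replaces A's top-down recursion with a bottom-up loop that folds the path parity into a single bit (bit = 1 ^ bit ^ pos%2) while ceil-halving pos, level-1 times; Pre_ excludes only level<=0, where A recurses until RecursionError.
import Mathlib
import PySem

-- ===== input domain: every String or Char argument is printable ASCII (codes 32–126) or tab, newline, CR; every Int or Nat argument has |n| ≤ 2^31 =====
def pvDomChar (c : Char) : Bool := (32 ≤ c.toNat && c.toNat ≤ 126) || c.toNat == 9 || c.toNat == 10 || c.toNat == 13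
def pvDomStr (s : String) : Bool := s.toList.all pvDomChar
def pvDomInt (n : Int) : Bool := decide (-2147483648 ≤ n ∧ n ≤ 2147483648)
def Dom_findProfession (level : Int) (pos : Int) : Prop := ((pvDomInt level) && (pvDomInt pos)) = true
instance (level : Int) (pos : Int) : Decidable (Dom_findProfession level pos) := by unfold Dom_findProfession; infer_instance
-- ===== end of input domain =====

-- B replaces A's recursion by a bottom-up single-bit parity loop (objective: simpler).

-- ===== PORT A =====
-- A's recursion on `level`; the Nat fuel is level.toNat. For level ≤ 0 A never
-- terminates (RecursionError), excluded by Pre_; the fuel-0 branch is never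
-- reached under Pre_.
def findProfessionA : Nat → Int → String
  | 0, _ => "Engineer"
  | 1, _ => "Engineer"
  | n+2, pos =>
      let x := PySem.Int.floordiv (pos + 1) 2
      let p := findProfessionA (n+1) x
      if p = "Doctor" then
        (if PySem.Int.mod pos 2 = 1 then "Doctor" else "Engineer")
      else
        (if PySem.Int.mod pos 2 = 1 then "Engineer" else "Doctor")

def findProfession (level : Int) (pos : Int) : String :=
  findProfessionA level.toNat pos

-- ===== PORT B =====
def findProfession_alt (level : Int) (pos : Int) : String :=
  let s := (List.range (level - 1).toNat).foldl
    (fun (s : Int × Int) _ =>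
      (PySem.Int.bxor (PySem.Int.bxor 1 s.1) (PySem.Int.mod s.2 2), PySem.Int.floordiv (s.2 + 1) 2))
    (0, pos)
  if s.1 ≠ 0 then "Doctor" else "Engineer"

-- ===== PRECONDITION & SPEC =====
-- Pre_ excludes exactly level ≤ 0, on which A recurses forever (RecursionError in Python).
def Pre_findProfession (level : Int) (pos : Int) : Prop := 1 ≤ level
instance (level : Int) (pos : Int) : Decidable (Pre_findProfession level pos) := by
  unfold Pre_findProfession; infer_instance

def pvWitness_findProfession : Int × Int := (3, 2)

def Spec_findProfession (level : Int) (pos : Int) (out : String) : Prop := out = findProfession_alt level pos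
instance (level : Int) (pos : Int) (out : String) : Decidable (Spec_findProfession level pos out) := by unfold Spec_findProfession; infer_instance

-- ===== CLAIM (what is proved, stated in full; the proofs are below) =====
def Claim_equal_findProfession : Prop := ∀ (level : Int) (pos : Int), Dom_findProfession level pos → Pre_findProfession level pos → Spec_findProfession level pos (findProfession level pos)

-- ===== LEMMAS AND PROOFS =====

-- one iteration of B's loop body
def pvStep (s : Int × Int) : Int × Int :=
  (PySem.Int.bxor (PySem.Int.bxor 1 s.1) (PySem.Int.mod s.2 2), PySem.Int.floordiv (s.2 + 1) 2)

def pvIter : Nat → Int × Int → Int × Int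
  | 0, s => s
  | n+1, s => pvIter n (pvStep s)

theorem foldl_range_eq_iter (m : Nat) (s : Int × Int) :
    (List.range m).foldl
      (fun (s : Int × Int) _ =>
        (PySem.Int.bxor (PySem.Int.bxor 1 s.1) (PySem.Int.mod s.2 2), PySem.Int.floordiv (s.2 + 1) 2))
      s = pvIter m s := by
  induction m generalizing s with
  | zero => rfl
  | succ n ih =>
      rw [List.range_succ_eq_map, List.foldl_cons, List.foldl_map]
      exact ih (pvStep s)

theorem mod_two_cases (p : Int) : PySem.Int.mod p 2 = 0 ∨ PySem.Int.mod p 2 = 1 := by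
  rw [PySem.Int.mod_eq_emod_of_pos (by norm_num)]
  omega

theorem xor100 : PySem.Int.bxor (PySem.Int.bxor 1 0) 0 = 1 := by decide
theorem xor101 : PySem.Int.bxor (PySem.Int.bxor 1 0) 1 = 0 := by decide
theorem xor110 : PySem.Int.bxor (PySem.Int.bxor 1 1) 0 = 0 := by decide
theorem xor111 : PySem.Int.bxor (PySem.Int.bxor 1 1) 1 = 1 := by decide

-- flipping the starting bit flips the final bit; the position trace is unchanged
theorem iter_flip (n : Nat) : ∀ p : Int,
    ((pvIter n (0, p)).1 = 0 ∧ (pvIter n (1, p)).1 = 1)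
    ∨ ((pvIter n (0, p)).1 = 1 ∧ (pvIter n (1, p)).1 = 0) := by
  induction n with
  | zero => intro p; left; exact ⟨rfl, rfl⟩
  | succ n ih =>
      intro p
      have hs : ∀ b : Int, pvIter (n+1) (b, p)
          = pvIter n (PySem.Int.bxor (PySem.Int.bxor 1 b) (PySem.Int.mod p 2), PySem.Int.floordiv (p + 1) 2) :=
        fun b => rfl
      rcases mod_two_cases p with hm | hm <;>
        rw [hs 0, hs 1, hm] <;>
        [rw [xor100, xor110]; rw [xor101, xor111]] <;>
        rcases ih (PySem.Int.floordiv (p + 1) 2) with ⟨h0, h1⟩ | ⟨h0, h1⟩ <;>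
        tauto

-- A's recursion computes exactly the loop's bit
theorem A_eq_iter (n : Nat) : ∀ p : Int,
    findProfessionA (n+1) p = (if (pvIter n (0, p)).1 ≠ 0 then "Doctor" else "Engineer") := by
  induction n with
  | zero => intro p; rfl
  | succ n ih =>
      intro p
      have hrec : findProfessionA (n+2) p =
          (if findProfessionA (n+1) (PySem.Int.floordiv (p+1) 2) = "Doctor" then
            (if PySem.Int.mod p 2 = 1 then "Doctor" else "Engineer")
          else
            (if PySem.Int.mod p 2 = 1 then "Engineer" else "Doctor")) := rfl
      have hit : pvIter (n+1) (0, p)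
          = pvIter n (PySem.Int.bxor (PySem.Int.bxor 1 0) (PySem.Int.mod p 2), PySem.Int.floordiv (p + 1) 2) := rfl
      rw [hrec, ih (PySem.Int.floordiv (p+1) 2), hit]
      rcases mod_two_cases p with hm | hm <;> rw [hm] <;>
        [rw [xor100]; rw [xor101]] <;>
        rcases iter_flip n (PySem.Int.floordiv (p + 1) 2) with ⟨h0, h1⟩ | ⟨h0, h1⟩ <;>
        (simp only [h0, h1]; norm_num; try decide)

-- ===== VERDICT (by name: the statement is the Claim_ definition above) =====
theorem findProfession_spec : Claim_equal_findProfession := by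
  intro level pos _ hpre
  unfold Spec_findProfession findProfession findProfession_alt
  rw [foldl_range_eq_iter]
  obtain ⟨n, hn⟩ : ∃ n : Nat, level = (n : Int) + 1 :=
    ⟨(level - 1).toNat, by unfold Pre_findProfession at hpre; omega⟩
  have ht : level.toNat = n + 1 := by omega
  have ht2 : (level - 1).toNat = n := by omega
  rw [ht, ht2, A_eq_iter]
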